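-- pv_equiv track=rewrite | github.com/Riloro/Two_Photon_Polymerization | MicrofabricationSoftware/nanoBuild_webApp/layouts/page1.py | x_path_optimizer
-- ===== SOURCE A (Python) =====
-- def x_path_optimizer(pointNum, vector_):
--     vector_opt = vector_.copy()
--     count = pointNum
--     while count <= len(vector_opt) - pointNum:
--         #Reverse the vector
--         vector_opt[count:count +
--                    pointNum] = vector_opt[count:count + pointNum][::-1]
--         #New value for counter
--         count += 2*pointNum
--     #Return new vector
--     return vector_opt
-- ===== SOURCE B (Python) =====
-- def x_path_optimizer(pointNum, vector_):
--     chunks = [vector_[i:i + pointNum] for i in range(0, len(vector_), pointNum)]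
--     out = []
--     for idx, chunk in enumerate(chunks):
--         if idx % 2 == 1 and len(chunk) == pointNum:
--             out.extend(chunk[::-1])
--         else:
--             out.extend(chunk)
--     return out
-- ===== Notes on version B (the rewrite author's own statement) =====
-- stated objective: simpler
-- what changed: B slices the list into consecutive pointNum-chunks with a comprehension and flattens them back, reversing each odd-indexed full chunk, instead of A's in-place strided slice-assignment while-loop over a mutable copy.
import Mathlib
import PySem

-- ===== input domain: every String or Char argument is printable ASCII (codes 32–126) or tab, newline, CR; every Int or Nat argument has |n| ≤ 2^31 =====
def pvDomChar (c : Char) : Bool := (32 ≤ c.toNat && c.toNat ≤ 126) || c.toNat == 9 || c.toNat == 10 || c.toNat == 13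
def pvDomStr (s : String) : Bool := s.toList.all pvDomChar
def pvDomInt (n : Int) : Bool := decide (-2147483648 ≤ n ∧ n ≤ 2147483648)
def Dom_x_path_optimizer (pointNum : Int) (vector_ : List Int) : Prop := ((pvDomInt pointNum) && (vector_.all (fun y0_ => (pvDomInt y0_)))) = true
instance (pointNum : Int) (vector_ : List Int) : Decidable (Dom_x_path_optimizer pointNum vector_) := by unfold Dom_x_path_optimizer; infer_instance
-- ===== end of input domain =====

-- B rebuilds the list from explicit chunks (chunk comprehension + flatten, reversing odd-indexed
-- full chunks) instead of A's in-place strided slice-assignment while-loop; objective: simpler.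

-- ===== PORT A =====
-- A's while-loop as fuel recursion; fuel = vector_.length + 1 always suffices when pointNum ≥ 1
-- (the guard needs count ≤ len - pointNum and count advances by 2*pointNum ≥ 2 each iteration).
def xpoGo (fuel : Nat) (pointNum : Int) (vec : List Int) (count : Int) : List Int :=
  match fuel with
  | 0 => vec
  | fuel + 1 =>
    if count ≤ (vec.length : Int) - pointNum then
      -- vector_opt[count:count+pointNum] = vector_opt[count:count+pointNum][::-1]
      -- (equal-length slice assignment; exact since here 0 ≤ count ≤ count+pointNum when pointNum ≥ 1)
      let seg := PySem.List.slice vec (some count) (some (count + pointNum))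
      let vec' := PySem.List.slice vec none (some count) ++ seg.reverse ++
                  PySem.List.slice vec (some (count + pointNum)) none
      xpoGo fuel pointNum vec' (count + 2 * pointNum)
    else vec

def x_path_optimizer (pointNum : Int) (vector_ : List Int) : List Int :=
  xpoGo (vector_.length + 1) pointNum vector_ pointNum

-- ===== PORT B =====
def x_path_optimizer_alt (pointNum : Int) (vector_ : List Int) : List Int :=
  let chunks := (PySem.List.pyRange 0 (vector_.length : Int) pointNum).map
    (fun i => PySem.List.slice vector_ (some i) (some (i + pointNum)))
  (PySem.List.enumerate chunks).foldl
    (fun out pr =>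
      out ++ (if pr.1 % 2 = 1 ∧ (pr.2.length : Int) = pointNum then pr.2.reverse else pr.2)) []

-- ===== PRECONDITION & SPEC =====
-- Pre_ excludes pointNum ≤ 0: there A's while-loop never terminates (count never passes the bound),
-- so A returns on exactly the inputs with pointNum ≥ 1.
def Pre_x_path_optimizer (pointNum : Int) (vector_ : List Int) : Prop := 1 ≤ pointNum
instance (pointNum : Int) (vector_ : List Int) : Decidable (Pre_x_path_optimizer pointNum vector_) := by unfold Pre_x_path_optimizer; infer_instance
def pvWitness_x_path_optimizer : Int × List Int := (2, [1, 2, 3, 4, 5, 6, 7])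

def Spec_x_path_optimizer (pointNum : Int) (vector_ : List Int) (out : List Int) : Prop := out = x_path_optimizer_alt pointNum vector_
instance (pointNum : Int) (vector_ : List Int) (out : List Int) : Decidable (Spec_x_path_optimizer pointNum vector_ out) := by unfold Spec_x_path_optimizer; infer_instance

-- ===== CLAIM (what is proved, stated in full; the proofs are below) =====
def Claim_equal_x_path_optimizer : Prop := ∀ (pointNum : Int) (vector_ : List Int), Dom_x_path_optimizer pointNum vector_ → Pre_x_path_optimizer pointNum vector_ → Spec_x_path_optimizer pointNum vector_ (x_path_optimizer pointNum vector_)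

-- ===== LEMMAS AND PROOFS =====

-- Common characterisation: the tail of the result after an already-kept prefix, processing an
-- odd-indexed (to-be-reversed) chunk first, then a kept chunk, and so on.
def xpoChunks (p : Nat) (rest : List Int) : List Int :=
  if h : 0 < p ∧ p ≤ rest.length then
    (rest.take p).reverse ++ (rest.drop p).take p ++ xpoChunks p ((rest.drop p).drop p)
  else rest
termination_by rest.length
decreasing_by simp only [List.length_drop]; omega

-- B's chunk list as a structural recursion.
def chunkListH (p : Nat) (v : List Int) : List (List Int) :=
  if h : 0 < p ∧ v ≠ [] then v.take p :: chunkListH p (v.drop p) else []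
termination_by v.length
decreasing_by
  have : 0 < v.length := List.length_pos_iff.mpr h.2
  simp only [List.length_drop]; omega

lemma chunkListH_nil (p : Nat) : chunkListH p [] = [] := by
  rw [chunkListH]; simp

lemma xpoChunks_nil (p : Nat) (hp : 0 < p) : xpoChunks p [] = [] := by
  rw [xpoChunks, dif_neg (by rintro ⟨-, h2⟩; simp at h2; omega)]

lemma xpoChunks_short (p : Nat) (rest : List Int) (h : ¬ p ≤ rest.length) :
    xpoChunks p rest = rest := by
  rw [xpoChunks, dif_neg (by omega : ¬ (0 < p ∧ p ≤ rest.length))]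

lemma pyRange_pos_nil (a b s : Int) (hs : 0 < s) (h : b ≤ a) :
    PySem.List.pyRange a b s = [] := by
  rw [PySem.List.pyRange_of_pos a b hs, if_neg (by omega : ¬ a < b)]
  simp

lemma pyRange_pos_cons (a b s : Int) (hs : 0 < s) (h : a < b) :
    PySem.List.pyRange a b s = a :: PySem.List.pyRange (a + s) b s := by
  rw [PySem.List.pyRange_of_pos a b hs, PySem.List.pyRange_of_pos (a + s) b hs]
  have hs0 : s ≠ 0 := by omega
  have hstep : (b - a + s - 1) / s = (b - (a + s) + s - 1) / s + 1 := by
    calc (b - a + s - 1) / s = (b - (a + s) + s - 1 + 1 * s) / s := by ring_nf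
    _ = (b - (a + s) + s - 1) / s + 1 := by rw [Int.add_mul_ediv_right _ _ hs0]
  have hcount : (if a < b then ((b - a + s - 1) / s).toNat else 0)
      = (if a + s < b then ((b - (a + s) + s - 1) / s).toNat else 0) + 1 := by
    rw [if_pos h]
    by_cases hb : a + s < b
    · rw [if_pos hb]
      have hM : 0 ≤ (b - (a + s) + s - 1) / s :=
        Int.ediv_nonneg (by omega) (by omega)
      omega
    · rw [if_neg hb]
      have hz : (b - (a + s) + s - 1) / s = 0 :=
        Int.ediv_eq_zero_of_lt (by omega) (by omega)
      omega
  rw [hcount, List.range_succ_eq_map, List.map_cons, List.map_map]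
  simp only [Nat.cast_zero, mul_zero, add_zero]
  congr 1
  refine List.map_congr_left ?_
  intro k _
  simp only [Function.comp_apply, Nat.succ_eq_add_one]
  push_cast
  ring

-- B's chunk comprehension produces exactly chunkListH.
lemma chunks_eq (p : Nat) (hp : 0 < p) (vec : List Int) :
    ∀ (n a : Nat), vec.length - a ≤ n →
      (PySem.List.pyRange (a : Int) (vec.length : Int) (p : Int)).map
        (fun i => PySem.List.slice vec (some i) (some (i + (p : Int)))) =
      chunkListH p (vec.drop a) := by
  intro n
  induction n with
  | zero =>
    intro a ha
    have hge : vec.length <= a := by omega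
    rw [pyRange_pos_nil _ _ _ (by exact_mod_cast hp) (by exact_mod_cast hge)]
    rw [List.drop_eq_nil_of_le hge, chunkListH_nil]
    simp
  | succ n ih =>
    intro a ha
    by_cases hlt : a < vec.length
    · rw [pyRange_pos_cons _ _ _ (by exact_mod_cast hp) (by exact_mod_cast hlt)]
      rw [List.map_cons]
      conv_rhs => rw [chunkListH]
      rw [dif_pos ⟨hp, by
        intro hnil
        have := List.drop_eq_nil_iff.mp hnil
        omega⟩]
      congr 1
      · exact PySem.List.slice_natCast_add vec a p
      · have hc : (a : Int) + (p : Int) = ((a + p : Nat) : Int) := by push_cast; ring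
        rw [hc, ih (a + p) (by omega), List.drop_drop]
    · rw [pyRange_pos_nil _ _ _ (by exact_mod_cast hp) (by push_cast; omega)]
      rw [List.drop_eq_nil_of_le (by omega), chunkListH_nil]
      simp

-- B's fold over the enumerated chunks, started at any even index, yields the common form.
lemma bfold (p : Nat) (hp : 0 < p) :
    ∀ (n : Nat) (rest : List Int), rest.length ≤ n → ∀ (t : Nat),
      (PySem.List.enumerate (chunkListH p rest) (2 * (t : Int))).flatMap
        (fun pr => if pr.1 % 2 = 1 ∧ ((pr.2.length : Int) = (p : Int)) then pr.2.reverse else pr.2) =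
      rest.take p ++ xpoChunks p (rest.drop p) := by
  intro n
  induction n with
  | zero =>
    intro rest hr t
    have hnil : rest = [] := by
      cases rest with
      | nil => rfl
      | cons x xs => simp at hr
    subst hnil
    rw [chunkListH_nil]
    simp [PySem.List.enumerate_nil, xpoChunks_nil p hp]
  | succ n ih =>
    intro rest hr t
    by_cases hnil : rest = []
    · subst hnil
      rw [chunkListH_nil]
      simp [PySem.List.enumerate_nil, xpoChunks_nil p hp]
    · rw [chunkListH, dif_pos ⟨hp, hnil⟩, PySem.List.enumerate_cons, List.flatMap_cons,
          if_neg (by intro hcond; omega)]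
      congr 1
      -- remaining: the odd-chunk-first tail
      have hrestpos : 0 < rest.length := List.length_pos_iff.mpr hnil
      by_cases hdnil : rest.drop p = []
      · rw [hdnil, chunkListH_nil]
        simp [PySem.List.enumerate_nil, xpoChunks_nil p hp]
      · have hdpos : 0 < (rest.drop p).length := List.length_pos_iff.mpr hdnil
        rw [chunkListH, dif_pos ⟨hp, hdnil⟩, PySem.List.enumerate_cons, List.flatMap_cons]
        by_cases hfull : p ≤ (rest.drop p).length
        · have hmin : (List.take p (rest.drop p)).length = p := by
            rw [List.length_take]; omega
          rw [if_pos ⟨by omega, by rw [hmin]⟩]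
          conv_rhs => rw [xpoChunks]
          rw [dif_pos ⟨hp, hfull⟩]
          have h2 : (2 * (t : Int) + 1 + 1) = 2 * ((t + 1 : Nat) : Int) := by push_cast; ring
          rw [h2, ih ((rest.drop p).drop p) (by simp only [List.length_drop]; omega) (t + 1)]
          simp [List.append_assoc]
        · rw [if_neg (by
            intro hcond
            have hlen := hcond.2
            rw [List.length_take] at hlen
            have : min p (rest.drop p).length = p := by exact_mod_cast hlen
            omega)]
          have hnil2 : List.drop p (rest.drop p) = [] :=
            List.drop_eq_nil_of_le (by omega)
          rw [hnil2, chunkListH_nil]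
          rw [xpoChunks_short p (rest.drop p) hfull]
          rw [List.take_of_length_le (by omega)]
          simp [PySem.List.enumerate_nil]

-- A's loop: with the finished prefix split off, it computes the common form.
lemma xpoGo_eq (p : Nat) (hp : 0 < p) :
    ∀ (fuel : Nat) (pre rest : List Int), rest.length + 1 ≤ fuel →
      xpoGo fuel (p : Int) (pre ++ rest) ((pre.length : Int)) = pre ++ xpoChunks p rest := by
  intro fuel
  induction fuel with
  | zero => intro pre rest h; omega
  | succ fuel ih =>
    intro pre rest hfuel
    rw [xpoGo]
    by_cases hg : (pre.length : Int) ≤ (((pre ++ rest).length : Nat) : Int) - (p : Int)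
    · have hple : p ≤ rest.length := by
        simp only [List.length_append] at hg
        push_cast at hg
        omega
      rw [if_pos hg]
      have hseg : PySem.List.slice (pre ++ rest) (some (pre.length : Int))
          (some ((pre.length : Int) + (p : Int))) = rest.take p := by
        rw [PySem.List.slice_natCast_add (pre ++ rest) pre.length p, List.drop_left]
      have hpref : PySem.List.slice (pre ++ rest) none (some (pre.length : Int)) = pre := by
        rw [PySem.List.slice_to_natCast, List.take_left]
      have hsuf : PySem.List.slice (pre ++ rest) (some ((pre.length : Int) + (p : Int))) none
          = rest.drop p := by
        have hc : (pre.length : Int) + (p : Int) = ((pre.length + p : Nat) : Int) := by push_cast; ring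
        rw [hc, PySem.List.slice_from_natCast, ← List.drop_drop]
        rw [List.drop_left]
      simp only [hseg, hpref, hsuf]
      conv_rhs => rw [xpoChunks]
      rw [dif_pos ⟨hp, hple⟩]
      by_cases h2p : p ≤ rest.length - p
      · -- two full chunks remain: recurse with the finished prefix extended by both
        have hkey : pre ++ (rest.take p).reverse ++ rest.drop p
            = (pre ++ (rest.take p).reverse ++ (rest.drop p).take p) ++ ((rest.drop p).drop p) := by
          simp [List.append_assoc]
        have hlen : (pre.length : Int) + 2 * (p : Int)
            = (((pre ++ (rest.take p).reverse ++ (rest.drop p).take p).length : Nat) : Int) := by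
          simp only [List.length_append, List.length_reverse, List.length_take, List.length_drop]
          push_cast
          omega
        rw [hkey, hlen]
        rw [ih _ _ (by simp only [List.length_drop]; omega)]
        simp [List.append_assoc]
      · -- a partial second chunk: the next guard fails, the loop stops
        have hdp : (rest.drop p).take p = rest.drop p :=
          List.take_of_length_le (by simp only [List.length_drop]; omega)
        obtain ⟨fuel2, rfl⟩ : ∃ f, fuel = f + 1 := ⟨fuel - 1, by omega⟩
        rw [xpoGo, if_neg (by
          simp only [List.length_append, List.length_reverse, List.length_take, List.length_drop]
          push_cast
          omega)]
        rw [hdp, xpoChunks_short p ((rest.drop p).drop p)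
          (by simp only [List.length_drop]; omega)]
        have hnil2 : (rest.drop p).drop p = [] :=
          List.drop_eq_nil_of_le (by simp only [List.length_drop]; omega)
        rw [hnil2]
        simp [List.append_assoc]
    · rw [if_neg hg]
      have hnp : ¬ (p ≤ rest.length) := by
        simp only [List.length_append] at hg
        push_cast at hg
        omega
      rw [xpoChunks_short p rest hnp]

lemma a_char (p : Nat) (hp : 0 < p) (vec : List Int) :
    x_path_optimizer (p : Int) vec = vec.take p ++ xpoChunks p (vec.drop p) := by
  unfold x_path_optimizer
  by_cases hle : p ≤ vec.length
  · have hsplit : vec = vec.take p ++ vec.drop p := (List.take_append_drop p vec).symm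
    have hlen : ((vec.take p).length : Int) = (p : Int) := by
      simp only [List.length_take]
      push_cast
      omega
    calc xpoGo (vec.length + 1) (p : Int) vec (p : Int)
        = xpoGo (vec.length + 1) (p : Int) (vec.take p ++ vec.drop p) (((vec.take p).length : Int)) := by
          rw [← hsplit, hlen]
      _ = vec.take p ++ xpoChunks p (vec.drop p) := by
          apply xpoGo_eq p hp
          simp only [List.length_drop]
          omega
  · rw [xpoGo, if_neg (by push_cast; omega)]
    rw [List.take_of_length_le (by omega), List.drop_eq_nil_of_le (by omega)]
    rw [xpoChunks_nil p hp]
    simp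

lemma b_char (p : Nat) (hp : 0 < p) (vec : List Int) :
    x_path_optimizer_alt (p : Int) vec = vec.take p ++ xpoChunks p (vec.drop p) := by
  unfold x_path_optimizer_alt
  rw [PySem.List.foldl_append_eq_flatMap, List.nil_append]
  have hchunks : (PySem.List.pyRange 0 (vec.length : Int) (p : Int)).map
      (fun i => PySem.List.slice vec (some i) (some (i + (p : Int)))) = chunkListH p vec := by
    have h := chunks_eq p hp vec vec.length 0 (by omega)
    simpa using h
  rw [hchunks]
  have h2 := bfold p hp vec.length vec (le_refl _) 0
  simpa using h2

-- ===== VERDICT (by name: the statement is the Claim_ definition above) =====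
theorem x_path_optimizer_spec : Claim_equal_x_path_optimizer := by
  intro pointNum vector_ _hdom hpre
  unfold Spec_x_path_optimizer
  unfold Pre_x_path_optimizer at hpre
  obtain ⟨p, rfl⟩ := Int.eq_ofNat_of_zero_le (by omega : (0 : Int) ≤ pointNum)
  have hp : 0 < p := by exact_mod_cast hpre
  rw [a_char p hp, b_char p hp]
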